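-- pv_equiv track=rewrite | github.com/wodydtns/problem_solving | chapter10_01.py | solution
-- ===== SOURCE A (Python) =====
-- def find(parents, x):
--     # 루트 노드 찾는 함수
--     # 만약 x의 부모가 자기 자신이면
--     if parents[x] == x:
--         return x
--     # 그렇지 않다면 x의 부모를 찾아서 parents[x]에 저장
--     # 그 부모 노드의 루트 노드를 찾아서 parents[x]에 저장
--     parents[x] = find(parents, parents[x])
--     return parents[x]
--
-- def union(parents, x, y):
--     # 두 개의 집합을 합치는 함수
--     # x가 속한 집합의 루트 노드 찾기
--     root1 = find(parents, x)
--     # y가 속한 집합의 루트 노드 찾기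
--     root2 = find(parents, y)
--
--     # y가 속한 집합을 x가 속한 집합에 합침
--     parents[root2] = root1
--
-- def solution(k, operations):
--     # 처음에는 각 노드가 자기 자신을 부모로 가지도록 초기화
--     parents = list(range(k))
--
--     # 집합의 개수를 저장할 변수, 처음에는 모든 노드가 서로 다른 집합에 있으므로 k
--     n = k
--
--     # opertaions 리스트에 있는 연산들을 하나씩 처리
--     for op in operations:
--         if op[0] == "u":
--             # op[1], op[2] 가 속한 집합을 합침
--             union(parents, op[1], op[2])
--         elif op[0] == "f":
--             find(parents, op[1])
--
--     # 모든 노드의 루트 노드를 찾아서 집합의 개수를 계산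
--     n = len(set(find(parents, i) for i in range(k)))
--
--     return n
-- ===== SOURCE B (Python) =====
-- def solution(k, operations):
--     # One-pass flat labelling: labels[i] is the representative of i at all times.
--     # A union relabels every member of the second set; no trees, no recursion.
--     labels = list(range(k))
--     for op in operations:
--         if op[0] == "u":
--             r1 = labels[op[1]]
--             r2 = labels[op[2]]
--             if r1 != r2:
--                 labels = [r1 if r == r2 else r for r in labels]
--     # labels are always values of range(k): count the distinct ones with a seen table
--     seen = [False] * len(labels)
--     count = 0
--     for r in labels:
--         if not seen[r]:
--             seen[r] = True
--             count += 1
--     return count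
-- ===== Notes on version B (the rewrite author's own statement) =====
-- stated objective: alternative
-- what changed: A builds a union-find forest with recursive path-compressing find and counts roots via a final find-per-node set; B keeps a flat label list that a union relabels in one pass (no trees, no recursion, 'f' ops are no-ops) and counts distinct labels with a single linear seen-table scan.
import Mathlib
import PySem

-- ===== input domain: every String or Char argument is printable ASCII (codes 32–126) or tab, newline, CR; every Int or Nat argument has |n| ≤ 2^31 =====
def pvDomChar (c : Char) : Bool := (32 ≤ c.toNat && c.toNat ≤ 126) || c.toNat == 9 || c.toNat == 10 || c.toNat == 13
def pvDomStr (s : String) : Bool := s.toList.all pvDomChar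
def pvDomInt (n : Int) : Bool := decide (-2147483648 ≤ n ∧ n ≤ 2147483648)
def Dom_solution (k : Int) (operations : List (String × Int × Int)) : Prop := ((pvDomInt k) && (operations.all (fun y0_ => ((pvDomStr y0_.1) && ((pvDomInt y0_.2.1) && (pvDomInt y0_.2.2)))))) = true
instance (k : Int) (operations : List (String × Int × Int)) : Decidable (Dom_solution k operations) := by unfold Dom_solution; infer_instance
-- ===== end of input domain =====

-- B replaces A's recursive path-compressing union-find forest by a flat label list that a
-- union relabels wholesale, counting distinct labels directly (objective: alternative).

-- ===== PORT A =====
-- Python lists are arrays: parents is ported as Array Int, with Python's index rule.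
def aGet? (a : Array Int) (x : Int) : Option Int :=
  (PySem.List.pyIdx? a.size x).bind fun i => a[i]?

def aSetD (a : Array Int) (x : Int) (v : Int) : Array Int :=
  match PySem.List.pyIdx? a.size x with
  | some i => a.setIfInBounds i v
  | none => a

-- find(parents, x) with path compression; the mutated array is threaded through as state.
-- fuel is a totality guard only: under Pre_ the recursion depth stays below it.
def findAr : Nat → Array Int → Int → Array Int × Int
  | 0, p, _ => (p, 0)
  | fuel+1, p, x =>
    match aGet? p x with
    | none => (p, 0)   -- Python raises IndexError here; excluded by Pre_
    | some px =>
      if px = x then (p, x)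
      else
        let pr := findAr fuel p px
        (aSetD pr.1 x pr.2, pr.2)

def unionAr (fuel : Nat) (p : Array Int) (x y : Int) : Array Int :=
  let pr1 := findAr fuel p x
  let pr2 := findAr fuel pr1.1 y
  aSetD pr2.1 pr2.2 pr1.2

def stepAr (fuel : Nat) (p : Array Int) (op : String × Int × Int) : Array Int :=
  if op.1 = "u" then unionAr fuel p op.2.1 op.2.2
  else if op.1 = "f" then (findAr fuel p op.2.1).1
  else p

-- the set of roots (ints of range(k)): Python's hash set of these ints is ported as a
-- seen table plus a count of first insertions — exactly len(set(...)) for such ints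
def addSeenA (st : Array Bool × Int) (r : Int) : Array Bool × Int :=
  if st.1.getD r.toNat false then st else (st.1.setIfInBounds r.toNat true, st.2 + 1)

def solution (k : Int) (operations : List (String × Int × Int)) : Int :=
  let parents := (PySem.List.pyRange 0 k 1).toArray
  let fuel := parents.size + operations.length + 2
  let p := operations.foldl (stepAr fuel) parents
  let fin := (PySem.List.pyRange 0 k 1).foldl
      (fun (st : Array Int × (Array Bool × Int)) i =>
        let pr := findAr fuel st.1 i
        (pr.1, addSeenA st.2 pr.2)) (p, (Array.replicate parents.size false, 0))
  fin.2.2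

-- ===== PORT B =====
def stepB (labels : List Int) (op : String × Int × Int) : List Int :=
  if op.1 = "u" then
    let r1 := PySem.List.pyGetD labels op.2.1 0
    let r2 := PySem.List.pyGetD labels op.2.2 0
    if r1 ≠ r2 then labels.map (fun r => if r = r2 then r1 else r) else labels
  else labels

def addSeenB (st : Array Bool × Int) (r : Int) : Array Bool × Int :=
  if st.1.getD r.toNat false then st else (st.1.setIfInBounds r.toNat true, st.2 + 1)

def solution_alt (k : Int) (operations : List (String × Int × Int)) : Int :=
  let labels := operations.foldl stepB (PySem.List.pyRange 0 k 1)
  (labels.foldl addSeenB (Array.replicate labels.length false, 0)).2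

-- ===== PRECONDITION & SPEC =====
-- Pre_ excludes exactly the inputs on which A raises IndexError: a "u" operation whose
-- endpoints (or an "f" operation whose argument) are not valid Python indices into the
-- k-element parents list.  Negative in-range indices are admitted (Python wraps them).
def Pre_solution (k : Int) (operations : List (String × Int × Int)) : Prop :=
  ∀ op ∈ operations,
    (op.1 = "u" → PySem.Raise.InRange k.toNat op.2.1 ∧ PySem.Raise.InRange k.toNat op.2.2) ∧
    (op.1 = "f" → PySem.Raise.InRange k.toNat op.2.1)
instance (k : Int) (operations : List (String × Int × Int)) : Decidable (Pre_solution k operations) := by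
  unfold Pre_solution; infer_instance

def pvWitness_solution : Int × (List (String × Int × Int)) :=
  (4, [("u", 0, 2), ("f", -1, 0), ("u", 3, 2), ("x", 9, 9)])

def Spec_solution (k : Int) (operations : List (String × Int × Int)) (out : Int) : Prop := out = solution_alt k operations
instance (k : Int) (operations : List (String × Int × Int)) (out : Int) : Decidable (Spec_solution k operations out) := by unfold Spec_solution; infer_instance

-- ===== CLAIM (what is proved, stated in full; the proofs are below) =====
def Claim_equal_solution : Prop := ∀ (k : Int) (operations : List (String × Int × Int)), Dom_solution k operations → Pre_solution k operations → Spec_solution k operations (solution k operations)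

-- ===== LEMMAS AND PROOFS =====

-- list-level models of the array port, used only by the proofs
def findA : Nat → List Int → Int → List Int × Int
  | 0, p, _ => (p, 0)
  | fuel+1, p, x =>
    match PySem.List.pyGet? p x with
    | none => (p, 0)
    | some px =>
      if px = x then (p, x)
      else
        let pr := findA fuel p px
        (PySem.List.pySetD pr.1 x pr.2, pr.2)

def unionA (fuel : Nat) (p : List Int) (x y : Int) : List Int :=
  let pr1 := findA fuel p x
  let pr2 := findA fuel pr1.1 y
  PySem.List.pySetD pr2.1 pr2.2 pr1.2

def stepA (fuel : Nat) (p : List Int) (op : String × Int × Int) : List Int :=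
  if op.1 = "u" then unionA fuel p op.2.1 op.2.2
  else if op.1 = "f" then (findA fuel p op.2.1).1
  else p

lemma findA_succ_some {p : List Int} {x px : Int} (h : PySem.List.pyGet? p x = some px) (F : Nat) :
    findA (F+1) p x = if px = x then (p, x)
      else ((PySem.List.pySetD (findA F p px).1 x (findA F p px).2, (findA F p px).2)) := by
  show (match PySem.List.pyGet? p x with
    | none => (p, 0)
    | some px => if px = x then (p, x)
      else
        let pr := findA F p px
        (PySem.List.pySetD pr.1 x pr.2, pr.2)) = _
  rw [h]

def myIdx (n : Nat) (x : Int) : Nat := if 0 ≤ x then x.toNat else n - (-x).toNat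

lemma pyIdx?_eq_some (n : Nat) (x : Int) (hx : PySem.Raise.InRange n x) :
    PySem.List.pyIdx? n x = some (myIdx n x) := by
  obtain ⟨h1, h2⟩ := hx
  simp only [PySem.List.pyIdx?, myIdx]
  split_ifs <;> simp_all

lemma myIdx_lt (n : Nat) (x : Int) (hx : PySem.Raise.InRange n x) : myIdx n x < n := by
  obtain ⟨h1, h2⟩ := hx
  simp only [myIdx]
  split_ifs with h <;> omega

lemma pyGet?_eq (xs : List Int) (x : Int) (hx : PySem.Raise.InRange xs.length x) :
    PySem.List.pyGet? xs x = xs[myIdx xs.length x]? := by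
  simp [PySem.List.pyGet?, pyIdx?_eq_some _ _ hx]

lemma pyGet?_some_inRange (xs : List Int) (x : Int) (v : Int)
    (h : PySem.List.pyGet? xs x = some v) : PySem.Raise.InRange xs.length x := by
  simp only [PySem.List.pyGet?, PySem.List.pyIdx?, PySem.Raise.InRange] at h ⊢
  split_ifs at h <;> simp_all <;> omega

lemma pyGet?_some_mem (xs : List Int) (x : Int) (v : Int)
    (h : PySem.List.pyGet? xs x = some v) : v ∈ xs := by
  simp only [PySem.List.pyGet?, Option.bind_eq_some_iff] at h
  obtain ⟨k, -, hk⟩ := h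
  exact List.mem_of_getElem? hk

lemma pyGetD_myIdx (xs : List Int) (x : Int) (d : Int) (hx : PySem.Raise.InRange xs.length x) :
    PySem.List.pyGetD xs x d = xs.getD (myIdx xs.length x) d := by
  simp [PySem.List.pyGetD, pyGet?_eq _ _ hx, List.getD]

lemma pyGet?_pySetD (q : List Int) (x v j : Int) (hx : PySem.Raise.InRange q.length x) :
    PySem.List.pyGet? (PySem.List.pySetD q x v) j =
      if PySem.Raise.InRange q.length j ∧ myIdx q.length j = myIdx q.length x then some v
      else PySem.List.pyGet? q j := by
  have hset : PySem.List.pySetD q x v = q.set (myIdx q.length x) v := by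
    simp [PySem.List.pySetD, PySem.List.pySet?, pyIdx?_eq_some _ _ hx]
  by_cases hj : PySem.Raise.InRange q.length j
  · rw [hset, pyGet?_eq _ _ (by simpa using hj), pyGet?_eq _ _ hj]
    · by_cases he : myIdx q.length j = myIdx q.length x
      · simp [hj, he, myIdx_lt _ _ hx]
      · simp [hj, he, List.getElem?_set_ne (Ne.symm he)]
  · have : ¬ PySem.Raise.InRange (PySem.List.pySetD q x v).length j := by
      simpa [hset] using hj
    have h1 : PySem.List.pyGet? q j = none := by
      cases hq : PySem.List.pyGet? q j with
      | none => rfl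
      | some v => exact absurd (pyGet?_some_inRange _ _ _ hq) hj
    have h2 : PySem.List.pyGet? (PySem.List.pySetD q x v) j = none := by
      cases hq : PySem.List.pyGet? (PySem.List.pySetD q x v) j with
      | none => rfl
      | some w => exact absurd (pyGet?_some_inRange _ _ _ hq) (by simpa [hset] using hj)
    simp [hj, h1, h2]

def ValidP (p : List Int) : Prop := ∀ v ∈ p, 0 ≤ v ∧ v < (p.length : Int)

def chase : Nat → List Int → Int → Option Int
  | 0, _, _ => none
  | fuel+1, p, x =>
    match PySem.List.pyGet? p x with
    | none => none
    | some px => if px = x then some x else chase fuel p px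

lemma chase_succ (m : Nat) (p : List Int) (x : Int) :
    chase (m+1) p x = match PySem.List.pyGet? p x with
      | none => none
      | some px => if px = x then some x else chase m p px := rfl

lemma chase_mono {m : Nat} : ∀ {p : List Int} {x r : Int},
    chase m p x = some r → chase (m+1) p x = some r := by
  induction m with
  | zero => intro p x r h; simp [chase] at h
  | succ m ih =>
    intro p x r h
    rw [chase_succ] at h ⊢
    cases hg : PySem.List.pyGet? p x with
    | none => simp [hg] at h
    | some px =>
      simp only [hg] at h ⊢
      split_ifs at h ⊢ with hpx
      · exact h
      · exact ih h

lemma chase_le {m m' : Nat} (h : m ≤ m') : ∀ {p : List Int} {x r : Int},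
    chase m p x = some r → chase m' p x = some r := by
  induction h with
  | refl => intro _ _ _ h; exact h
  | step _ ih => intro p x r h; exact chase_mono (ih h)

lemma chase_det {m : Nat} : ∀ {m' : Nat} {p : List Int} {x a b : Int},
    chase m p x = some a → chase m' p x = some b → a = b := by
  intro m' p x a b h1 h2
  rcases Nat.le_total m m' with h | h
  · rw [chase_le h h1] at h2; exact (Option.some_inj.mp h2)
  · rw [chase_le h h2] at h1; exact (Option.some_inj.mp h1).symm

lemma chase_fix {m : Nat} : ∀ {p : List Int} {x r : Int},
    chase m p x = some r → PySem.List.pyGet? p r = some r := by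
  induction m with
  | zero => intro p x r h; simp [chase] at h
  | succ m ih =>
    intro p x r h
    rw [chase_succ] at h
    cases hg : PySem.List.pyGet? p x with
    | none => simp [hg] at h
    | some px =>
      simp only [hg] at h
      split_ifs at h with hpx
      · cases Option.some_inj.mp h; rw [← hpx] at hg ⊢; exact hg
      · exact ih h

lemma chase_of_fix {p : List Int} {r : Int} (h : PySem.List.pyGet? p r = some r)
    {m : Nat} (hm : 1 ≤ m) : chase m p r = some r := by
  obtain ⟨m', rfl⟩ : ∃ m', m = m' + 1 := ⟨m - 1, by omega⟩
  rw [chase_succ, h]; simp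

lemma fix_bounds {p : List Int} {r : Int} (hv : ValidP p)
    (h : PySem.List.pyGet? p r = some r) :
    0 ≤ r ∧ r < (p.length : Int) ∧ myIdx p.length r = r.toNat := by
  have hb := hv r (pyGet?_some_mem _ _ _ h)
  exact ⟨hb.1, hb.2, by simp [myIdx, hb.1]⟩

lemma valid_pySetD (q : List Int) (x v : Int) (hv : ValidP q)
    (h0 : 0 ≤ v) (h1 : v < (q.length : Int)) : ValidP (PySem.List.pySetD q x v) := by
  intro w hw
  rw [PySem.List.length_pySetD]
  have : w ∈ q ∨ w = v := by
    simp only [PySem.List.pySetD, PySem.List.pySet?] at hw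
    cases hix : PySem.List.pyIdx? q.length x with
    | none => simp [hix] at hw; exact Or.inl hw
    | some ix =>
      simp only [hix, Option.map_some, Option.getD_some] at hw
      exact List.mem_or_eq_of_mem_set hw
  rcases this with h | rfl
  · exact hv w h
  · exact ⟨h0, h1⟩

lemma chase_succ_some {p : List Int} {x px : Int} (h : PySem.List.pyGet? p x = some px) (m : Nat) :
    chase (m+1) p x = if px = x then some x else chase m p px := by rw [chase_succ, h]

lemma chase_pos {m : Nat} {p : List Int} {x r : Int} (h : chase m p x = some r) : 1 ≤ m := by
  cases m with
  | zero => simp [chase] at h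
  | succ _ => omega

lemma chase_set (q : List Int) (x r : Int) (mx : Nat) (hx : chase mx q x = some r) :
    ∀ m (j rj : Int), chase m q j = some rj →
      chase m (PySem.List.pySetD q x r) j = some rj := by
  obtain ⟨mx0, rfl⟩ : ∃ m', mx = m' + 1 := ⟨mx - 1, by have := chase_pos hx; omega⟩
  cases hgx : PySem.List.pyGet? q x with
  | none => rw [chase_succ, hgx] at hx; simp at hx
  | some px =>
  rw [chase_succ_some hgx] at hx
  have hxin : PySem.Raise.InRange q.length x := pyGet?_some_inRange _ _ _ hgx
  have hrfix : PySem.List.pyGet? q r = some r := by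
    split_ifs at hx with hpx
    · cases Option.some_inj.mp hx; rw [← hpx] at hgx ⊢; exact hgx
    · exact chase_fix hx
  have hget' := fun j => pyGet?_pySetD q x r j hxin
  intro m
  induction m with
  | zero => intro j rj h; simp [chase] at h
  | succ m ih =>
    intro j rj h
    cases hgj : PySem.List.pyGet? q j with
    | none => rw [chase_succ, hgj] at h; simp at h
    | some pj =>
    rw [chase_succ_some hgj] at h
    have hjin : PySem.Raise.InRange q.length j := pyGet?_some_inRange _ _ _ hgj
    by_cases hidx : myIdx q.length j = myIdx q.length x
    · -- j reads the updated cell; its old root equals r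
      have hpj : pj = px := by
        have hsame : PySem.List.pyGet? q j = PySem.List.pyGet? q x := by
          rw [pyGet?_eq _ _ hjin, pyGet?_eq _ _ hxin, hidx]
        rw [hgj, hgx] at hsame; exact Option.some_inj.mp hsame
      subst hpj
      have hrj : rj = r := by
        split_ifs at h with hje
        · cases Option.some_inj.mp h
          split_ifs at hx with hxe
          · cases Option.some_inj.mp hx; rw [← hxe, hje]
          · have hfix : PySem.List.pyGet? q pj = some pj := by rw [hje] at hgj ⊢; exact hgj
            rw [← hje]
            exact chase_det (chase_of_fix hfix (chase_pos hx)) hx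
        · split_ifs at hx with hxe
          · have hfix : PySem.List.pyGet? q pj = some pj := by rw [hxe] at hgx; rw [hxe]; exact hgx
            have h2 := chase_det h (chase_of_fix hfix (chase_pos h))
            rw [h2, hxe]
            exact Option.some_inj.mp hx
          · exact chase_det h hx
      subst hrj
      have hq'j : PySem.List.pyGet? (PySem.List.pySetD q x rj) j = some rj := by
        rw [hget' j]; simp [hjin, hidx]
      rw [chase_succ_some hq'j]
      split_ifs with hrjj
      · rw [hrjj]
      · -- rj (= r) is a fixpoint of the updated list
        have hm1 : 1 ≤ m := by
          split_ifs at h with hje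
          · exact absurd (Option.some_inj.mp h).symm hrjj
          · exact chase_pos h
        apply chase_of_fix _ hm1
        rw [hget' rj]
        split_ifs with hc
        · rfl
        · exact hrfix
    · -- untouched cell
      have hq'j : PySem.List.pyGet? (PySem.List.pySetD q x r) j = some pj := by
        rw [hget' j]; simp [hidx, hgj]
      rw [chase_succ_some hq'j]
      split_ifs at h ⊢ with hje
      · exact h
      · exact ih pj rj h

lemma chase_union (q : List Int) (r1 r2 : Int)
    (h1 : PySem.List.pyGet? q r1 = some r1) (h2 : PySem.List.pyGet? q r2 = some r2) :
    ∀ m (j rj : Int), chase m q j = some rj →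
      chase (m+1) (PySem.List.pySetD q r2 r1) j = some (if rj = r2 then r1 else rj) := by
  have hr2in : PySem.Raise.InRange q.length r2 := pyGet?_some_inRange _ _ _ h2
  have hget' := fun j => pyGet?_pySetD q r2 r1 j hr2in
  have h1' : PySem.List.pyGet? (PySem.List.pySetD q r2 r1) r1 = some r1 := by
    rw [hget' r1]; split_ifs with hc
    · rfl
    · exact h1
  intro m
  induction m with
  | zero => intro j rj h; simp [chase] at h
  | succ m ih =>
    intro j rj h
    cases hgj : PySem.List.pyGet? q j with
    | none => rw [chase_succ, hgj] at h; simp at h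
    | some pj =>
    rw [chase_succ_some hgj] at h
    have hjin : PySem.Raise.InRange q.length j := pyGet?_some_inRange _ _ _ hgj
    by_cases hidx : myIdx q.length j = myIdx q.length r2
    · -- j reads the overwritten cell: its old value and old root are r2
      have hpj : pj = r2 := by
        have hsame : PySem.List.pyGet? q j = PySem.List.pyGet? q r2 := by
          rw [pyGet?_eq _ _ hjin, pyGet?_eq _ _ hr2in, hidx]
        rw [hgj, h2] at hsame; exact Option.some_inj.mp hsame
      have hrj : rj = r2 := by
        split_ifs at h with hje
        · exact (Option.some_inj.mp h).symm.trans (hje ▸ hpj)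
        · rw [← hpj]
          exact chase_det h (chase_of_fix (by rw [hpj]; exact h2) (chase_pos h))
      have hq'j : PySem.List.pyGet? (PySem.List.pySetD q r2 r1) j = some r1 := by
        rw [hget' j]; simp [hjin, hidx]
      rw [hrj, if_pos rfl, chase_succ_some hq'j]
      split_ifs with hr1j
      · rw [hr1j]
      · exact chase_of_fix h1' (by omega)
    · -- untouched cell
      have hq'j : PySem.List.pyGet? (PySem.List.pySetD q r2 r1) j = some pj := by
        rw [hget' j]; simp [hidx, hgj]
      rw [chase_succ_some hq'j]
      split_ifs at h with hje
      · cases Option.some_inj.mp h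
        have hjr2 : j ≠ r2 := fun hc => hidx (by rw [hc])
        rw [if_pos hje, if_neg hjr2]
      · rw [if_neg hje]
        exact ih pj rj h



lemma findA_spec (m : Nat) : ∀ (F : Nat) (p : List Int) (x r : Int),
    chase m p x = some r → m ≤ F → ValidP p →
    (findA F p x).2 = r ∧ (findA F p x).1.length = p.length ∧ ValidP (findA F p x).1 ∧
    ∀ (m' : Nat) (j rj : Int), chase m' p j = some rj →
      chase m' (findA F p x).1 j = some rj := by
  induction m with
  | zero => intro F p x r h; simp [chase] at h
  | succ m ih =>
    intro F p x r h hF hv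
    obtain ⟨F0, rfl⟩ : ∃ F', F = F' + 1 := ⟨F - 1, by omega⟩
    cases hgx : PySem.List.pyGet? p x with
    | none => rw [chase_succ, hgx] at h; simp at h
    | some px =>
    rw [chase_succ_some hgx] at h
    rw [findA_succ_some hgx]
    split_ifs at h ⊢ with hpx
    · cases Option.some_inj.mp h
      exact ⟨rfl, rfl, hv, fun _ _ _ hc => hc⟩
    · obtain ⟨ih2, ihlen, ihv, ihpres⟩ := ih F0 p px r h (by omega) hv
      set pr := findA F0 p px with hpr
      -- the root r is reachable from x in pr.1 as well
      have hx1 : chase (m+1) pr.1 x = some r := ihpres (m+1) x r (by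
        rw [chase_succ_some hgx, if_neg hpx]; exact h)
      have hfixr : PySem.List.pyGet? pr.1 r = some r := chase_fix hx1
      refine ⟨by simp [ih2], ?_, ?_, ?_⟩
      · simp only [ih2]
        rw [PySem.List.length_pySetD, ihlen]
      · simp only [ih2]
        obtain ⟨hb0, hb1, -⟩ := fix_bounds ihv hfixr
        exact valid_pySetD _ _ _ ihv hb0 hb1
      · intro m' j rj hc
        simp only [ih2]
        exact chase_set pr.1 x r (m+1) hx1 m' j rj (ihpres m' j rj hc)

def InvPR (n b : Nat) (p roots : List Int) : Prop :=
  p.length = n ∧ roots.length = n ∧ ValidP p ∧ 2 ≤ b ∧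
  ∀ j : Nat, j < n → chase b p (j : Int) = some (roots.getD j 0)

lemma chase_start {n b : Nat} {p roots : List Int} (h : InvPR n b p roots)
    (x : Int) (hx : PySem.Raise.InRange n x) :
    chase b p x = some (roots.getD (myIdx n x) 0) := by
  obtain ⟨hlen, hrlen, hv, hb, hroots⟩ := h
  have hix : myIdx n x < n := myIdx_lt n x hx
  have hj := hroots (myIdx n x) hix
  by_cases h0 : 0 ≤ x
  · have : (myIdx n x : Int) = x := by simp [myIdx, h0]
    rwa [this] at hj
  · -- negative in-range index: first step reads the same cell as the nonneg alias
    obtain ⟨b0, rfl⟩ : ∃ b', b = b' + 1 := ⟨b - 1, by omega⟩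
    have hxin : PySem.Raise.InRange p.length x := by rw [hlen]; exact hx
    have hiin : PySem.Raise.InRange p.length (myIdx n x : Int) := by
      rw [hlen]; constructor <;> omega
    have hsame : PySem.List.pyGet? p x = PySem.List.pyGet? p (myIdx n x : Int) := by
      have hAB : myIdx p.length x = myIdx p.length ((myIdx n x : Nat) : Int) := by
        simp only [myIdx]
        split_ifs <;> omega
      rw [pyGet?_eq _ _ hxin, pyGet?_eq _ _ hiin, hAB]
    cases hgi : PySem.List.pyGet? p (myIdx n x : Int) with
    | none => rw [chase_succ, hgi] at hj; simp at hj
    | some pi =>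
    rw [chase_succ_some hgi] at hj
    have hgx : PySem.List.pyGet? p x = some pi := by rw [hsame, hgi]
    rw [chase_succ_some hgx]
    have hpi0 : 0 ≤ pi := (hv pi (pyGet?_some_mem _ _ _ hgx)).1
    rw [if_neg (by omega)]
    split_ifs at hj with hie
    · have hmp := Option.some_inj.mp hj
      rw [hie, ← hmp]
      exact chase_of_fix (by rw [hgi, hie]) (by omega)
    · exact hj




def PreOp (n : Nat) (op : String × Int × Int) : Prop :=
  (op.1 = "u" → PySem.Raise.InRange n op.2.1 ∧ PySem.Raise.InRange n op.2.2) ∧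
  (op.1 = "f" → PySem.Raise.InRange n op.2.1)

lemma getD_map_lt (l : List Int) (f : Int → Int) (j : Nat) (hj : j < l.length) (d d' : Int) :
    (l.map f).getD j d = f (l.getD j d') := by
  rw [List.getD_eq_getElem?_getD, List.getD_eq_getElem?_getD,
     List.getElem?_eq_getElem (by simpa using hj), List.getElem?_eq_getElem hj]
  simp

lemma inv_mono {n b : Nat} {p roots : List Int} (h : InvPR n b p roots) :
    InvPR n (b+1) p roots :=
  ⟨h.1, h.2.1, h.2.2.1, Nat.le_succ_of_le h.2.2.2.1, fun j hj => chase_mono (h.2.2.2.2 j hj)⟩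

lemma step_inv {F n b : Nat} {p roots : List Int} (op : String × Int × Int)
    (hF : b ≤ F) (hop : PreOp n op) (h : InvPR n b p roots) :
    InvPR n (b+1) (stepA F p op) (stepB roots op) := by
  obtain ⟨hlen, hrlen, hv, hb, hroots⟩ := h
  by_cases hu : op.1 = "u"
  · obtain ⟨hx, hy⟩ := hop.1 hu
    have hcx : chase b p op.2.1 = some (roots.getD (myIdx n op.2.1) 0) :=
      chase_start ⟨hlen, hrlen, hv, hb, hroots⟩ op.2.1 hx
    obtain ⟨hr1, hlen1, hv1, hpres1⟩ := findA_spec b F p op.2.1 _ hcx hF hv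
    have h1 : InvPR n b (findA F p op.2.1).1 roots :=
      ⟨hlen1.trans hlen, hrlen, hv1, hb, fun j hj => hpres1 b _ _ (hroots j hj)⟩
    have hcy : chase b (findA F p op.2.1).1 op.2.2
        = some (roots.getD (myIdx n op.2.2) 0) := chase_start h1 op.2.2 hy
    obtain ⟨hr2, hlen2, hv2, hpres2⟩ :=
      findA_spec b F (findA F p op.2.1).1 op.2.2 _ hcy hF hv1
    have hfix1 : PySem.List.pyGet? (findA F (findA F p op.2.1).1 op.2.2).1
        (roots.getD (myIdx n op.2.1) 0) = some (roots.getD (myIdx n op.2.1) 0) :=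
      chase_fix (hpres2 b _ _ (hpres1 b _ _ hcx))
    have hfix2 : PySem.List.pyGet? (findA F (findA F p op.2.1).1 op.2.2).1
        (roots.getD (myIdx n op.2.2) 0) = some (roots.getD (myIdx n op.2.2) 0) :=
      chase_fix (hpres2 b _ _ hcy)
    have hbnd := fix_bounds hv2 hfix1
    have hA : stepA F p op = PySem.List.pySetD (findA F (findA F p op.2.1).1 op.2.2).1
        (roots.getD (myIdx n op.2.2) 0) (roots.getD (myIdx n op.2.1) 0) := by
      simp only [stepA, if_pos hu, unionA]
      rw [hr1, hr2]
    have hchase : ∀ j : Nat, j < n →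
        chase (b+1) (PySem.List.pySetD (findA F (findA F p op.2.1).1 op.2.2).1
            (roots.getD (myIdx n op.2.2) 0) (roots.getD (myIdx n op.2.1) 0)) (j : Int)
          = some (if roots.getD j 0 = roots.getD (myIdx n op.2.2) 0
              then roots.getD (myIdx n op.2.1) 0 else roots.getD j 0) :=
      fun j hj => chase_union _ _ _ hfix1 hfix2 b _ _
        (hpres2 b _ _ (hpres1 b _ _ (hroots j hj)))
    have hxR : PySem.Raise.InRange roots.length op.2.1 := by rw [hrlen]; exact hx
    have hyR : PySem.Raise.InRange roots.length op.2.2 := by rw [hrlen]; exact hy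
    have hB : stepB roots op = if roots.getD (myIdx n op.2.1) 0 ≠ roots.getD (myIdx n op.2.2) 0
        then roots.map (fun r => if r = roots.getD (myIdx n op.2.2) 0
          then roots.getD (myIdx n op.2.1) 0 else r) else roots := by
      simp only [stepB, if_pos hu, pyGetD_myIdx _ _ _ hxR, pyGetD_myIdx _ _ _ hyR, hrlen]
    rw [hA, hB]
    refine ⟨?_, ?_, ?_, by omega, ?_⟩
    · rw [PySem.List.length_pySetD, hlen2, hlen1, hlen]
    · split_ifs <;> simp [hrlen]
    · exact valid_pySetD _ _ _ hv2 hbnd.1 hbnd.2.1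
    · intro j hj
      rw [hchase j hj]
      by_cases hne : roots.getD (myIdx n op.2.1) 0 ≠ roots.getD (myIdx n op.2.2) 0
      · rw [if_pos hne, getD_map_lt roots _ j (by omega) 0 0]
      · rw [if_neg hne]
        rw [not_not] at hne
        congr 1
        by_cases he : roots.getD j 0 = roots.getD (myIdx n op.2.2) 0
        · rw [if_pos he, hne, he]
        · rw [if_neg he]
  · by_cases hf : op.1 = "f"
    · have hx := hop.2 hf
      have hcx : chase b p op.2.1 = some (roots.getD (myIdx n op.2.1) 0) :=
        chase_start ⟨hlen, hrlen, hv, hb, hroots⟩ _ hx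
      obtain ⟨-, hlen1, hv1, hpres1⟩ := findA_spec b F p op.2.1 _ hcx hF hv
      have hA : stepA F p op = (findA F p op.2.1).1 := by
        simp only [stepA, if_neg hu, if_pos hf]
      have hB : stepB roots op = roots := by simp only [stepB, if_neg hu]
      rw [hA, hB]
      exact inv_mono ⟨hlen1.trans hlen, hrlen, hv1, hb,
        fun j hj => hpres1 b _ _ (hroots j hj)⟩
    · have hA : stepA F p op = p := by simp only [stepA, if_neg hu, if_neg hf]
      have hB : stepB roots op = roots := by simp only [stepB, if_neg hu]
      rw [hA, hB]
      exact inv_mono ⟨hlen, hrlen, hv, hb, hroots⟩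

lemma ops_fold {F n : Nat} : ∀ (ops : List (String × Int × Int)) (b : Nat) (p roots : List Int),
    (∀ op ∈ ops, PreOp n op) → InvPR n b p roots → b + ops.length ≤ F →
    InvPR n (b + ops.length) (ops.foldl (stepA F) p) (ops.foldl stepB roots) := by
  intro ops
  induction ops with
  | nil => intro b p roots _ h _; simpa using h
  | cons op ops ih =>
    intro b p roots hpre h hF
    have h' := step_inv (F := F) (b := b) op (by simp only [List.length_cons] at hF; omega) (hpre op (by simp)) h
    have := ih (b+1) _ _ (fun o ho => hpre o (by simp [ho])) h' (by simp at hF ⊢; omega)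
    simpa [List.foldl_cons, Nat.add_assoc, Nat.add_comm 1 ops.length] using this

lemma aGet?_toList (a : Array Int) (x : Int) :
    aGet? a x = PySem.List.pyGet? a.toList x := by
  simp [aGet?, PySem.List.pyGet?]

lemma aSetD_toList (a : Array Int) (x v : Int) :
    (aSetD a x v).toList = PySem.List.pySetD a.toList x v := by
  simp only [aSetD, PySem.List.pySetD, PySem.List.pySet?, Array.length_toList]
  cases h : PySem.List.pyIdx? a.size x with
  | none => simp
  | some i => simp [Array.toList_setIfInBounds]

lemma findA_succ_none {p : List Int} {x : Int} (h : PySem.List.pyGet? p x = none) (F : Nat) :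
    findA (F+1) p x = (p, 0) := by
  show (match PySem.List.pyGet? p x with
    | none => (p, 0)
    | some px => if px = x then (p, x)
      else
        let pr := findA F p px
        (PySem.List.pySetD pr.1 x pr.2, pr.2)) = _
  rw [h]

lemma findAr_succ (F : Nat) (a : Array Int) (x : Int) :
    findAr (F+1) a x = match aGet? a x with
      | none => (a, 0)
      | some px =>
        if px = x then (a, x)
        else (aSetD (findAr F a px).1 x (findAr F a px).2, (findAr F a px).2) := rfl

lemma findAr_succ_none {a : Array Int} {x : Int} (h : aGet? a x = none) (F : Nat) :
    findAr (F+1) a x = (a, 0) := by rw [findAr_succ, h]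

lemma findAr_succ_some {a : Array Int} {x px : Int} (h : aGet? a x = some px) (F : Nat) :
    findAr (F+1) a x = if px = x then (a, x)
      else (aSetD (findAr F a px).1 x (findAr F a px).2, (findAr F a px).2) := by
  rw [findAr_succ, h]

lemma findAr_toList (F : Nat) : ∀ (a : Array Int) (x : Int),
    (findAr F a x).1.toList = (findA F a.toList x).1 ∧
    (findAr F a x).2 = (findA F a.toList x).2 := by
  induction F with
  | zero => intro a x; exact ⟨rfl, rfl⟩
  | succ F ih =>
    intro a x
    have hg' : aGet? a x = PySem.List.pyGet? a.toList x := aGet?_toList a x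
    cases hg : PySem.List.pyGet? a.toList x with
    | none => rw [findAr_succ_none (hg'.trans hg), findA_succ_none hg]; exact ⟨rfl, rfl⟩
    | some px =>
      rw [findAr_succ_some (hg'.trans hg), findA_succ_some hg]
      split_ifs with hpx
      · exact ⟨rfl, rfl⟩
      · obtain ⟨h1, h2⟩ := ih a px
        exact ⟨by simp only; rw [aSetD_toList, h1, h2], h2⟩

lemma stepAr_toList (F : Nat) (a : Array Int) (op : String × Int × Int) :
    (stepAr F a op).toList = stepA F a.toList op := by
  simp only [stepAr, stepA, unionA, unionAr]
  split_ifs with hu hf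
  · obtain ⟨h1, h2⟩ := findAr_toList F a op.2.1
    obtain ⟨h1', h2'⟩ := findAr_toList F (findAr F a op.2.1).1 op.2.2
    rw [aSetD_toList, h1', h2', h1, h2]
  · exact (findAr_toList F a op.2.1).1
  · rfl

lemma foldl_stepAr_toList (F : Nat) : ∀ (ops : List (String × Int × Int)) (a : Array Int),
    (ops.foldl (stepAr F) a).toList = ops.foldl (stepA F) a.toList := by
  intro ops
  induction ops with
  | nil => intro a; rfl
  | cons op ops ih =>
    intro a
    simp only [List.foldl_cons]
    rw [ih, stepAr_toList]

lemma final_fold {F n b : Nat} {σ : Type} (g : σ → Int → σ) (hbF : b ≤ F) :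
    ∀ (l : List Int) (a : Array Int) (roots : List Int) (s : σ),
    InvPR n b a.toList roots → (∀ i ∈ l, 0 ≤ i ∧ i < (n : Int)) →
    (l.foldl (fun (st : Array Int × σ) i =>
        let pr := findAr F st.1 i
        (pr.1, g st.2 pr.2)) (a, s)).2
      = l.foldl (fun s i => g s (roots.getD i.toNat 0)) s := by
  intro l
  induction l with
  | nil => intro a roots s _ _; rfl
  | cons i l ih =>
    intro a roots s h hmem
    obtain ⟨hi0, hin⟩ := hmem i (by simp)
    obtain ⟨hlen, hrlen, hv, hb, hroots⟩ := h
    have hci : chase b a.toList i = some (roots.getD i.toNat 0) := by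
      have := hroots i.toNat (by omega)
      rwa [Int.toNat_of_nonneg hi0] at this
    obtain ⟨hr, hlen1, hv1, hpres1⟩ := findA_spec b F a.toList i _ hci hbF hv
    obtain ⟨ha1, ha2⟩ := findAr_toList F a i
    simp only [List.foldl_cons]
    rw [ih _ roots _ ⟨by rw [ha1]; exact hlen1.trans hlen, hrlen, by rw [ha1]; exact hv1, hb,
        fun j hj => by rw [ha1]; exact hpres1 b _ _ (hroots j hj)⟩
        (fun x hx => hmem x (by simp [hx]))]
    rw [ha2, hr]

-- ===== VERDICT (by name: the statement is the Claim_ definition above) =====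
theorem solution_spec : Claim_equal_solution := by
  intro k ops _ hpre
  show solution k ops = solution_alt k ops
  simp only [solution, solution_alt]
  have hlenP : (PySem.List.pyRange 0 k 1).length = k.toNat := by
    rw [PySem.List.length_pyRange_one]; simp
  have hsz0 : (PySem.List.pyRange 0 k 1).toArray.size = k.toNat := by
    simp [hlenP]
  have hInv0 : InvPR k.toNat 2 (PySem.List.pyRange 0 k 1) (PySem.List.pyRange 0 k 1) := by
    refine ⟨hlenP, hlenP, ?_, by omega, ?_⟩
    · intro v hv
      have := PySem.List.mem_pyRange_one.mp hv
      constructor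
      · omega
      · rw [hlenP]; omega
    · intro j hj
      have hin : PySem.Raise.InRange (PySem.List.pyRange 0 k 1).length (j : Int) := by
        rw [hlenP]; constructor <;> omega
      have hmy : myIdx (PySem.List.pyRange 0 k 1).length (j : Int) = j := by simp [myIdx]
      have hget : (PySem.List.pyRange 0 k 1)[j]? = some (j : Int) := by
        rw [List.getElem?_eq_getElem (by omega)]
        rw [PySem.List.getElem_pyRange_one]
        simp
      have hg : PySem.List.pyGet? (PySem.List.pyRange 0 k 1) (j : Int) = some (j : Int) := by
        rw [pyGet?_eq _ _ hin, hmy, hget]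
      rw [chase_succ_some hg, if_pos rfl]
      rw [List.getD_eq_getElem?_getD, hget]
      rfl
  have hops := ops_fold (F := (PySem.List.pyRange 0 k 1).toArray.size + ops.length + 2)
    ops 2 _ _ (fun op ho => hpre op ho) hInv0 (by omega)
  have hsim : (ops.foldl (stepAr ((PySem.List.pyRange 0 k 1).toArray.size + ops.length + 2))
        (PySem.List.pyRange 0 k 1).toArray).toList
      = ops.foldl (stepA ((PySem.List.pyRange 0 k 1).toArray.size + ops.length + 2))
        (PySem.List.pyRange 0 k 1) := by
    rw [foldl_stepAr_toList]
  have hfin := final_fold (g := addSeenA)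
    (F := (PySem.List.pyRange 0 k 1).toArray.size + ops.length + 2)
    (n := k.toNat) (b := 2 + ops.length) (by omega)
    (PySem.List.pyRange 0 k 1)
    (ops.foldl (stepAr ((PySem.List.pyRange 0 k 1).toArray.size + ops.length + 2))
      (PySem.List.pyRange 0 k 1).toArray)
    (ops.foldl stepB (PySem.List.pyRange 0 k 1))
    (Array.replicate (PySem.List.pyRange 0 k 1).toArray.size false, (0 : Int))
    (by rw [hsim]; simpa [Nat.add_comm] using hops)
    (by
      intro i hi
      have := PySem.List.mem_pyRange_one.mp hi
      constructor <;> omega)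
  rw [hfin]
  have hRlen : (ops.foldl stepB (PySem.List.pyRange 0 k 1)).length = k.toNat := hops.2.1
  have hmap : (PySem.List.pyRange 0 k 1).map
      (fun i => (ops.foldl stepB (PySem.List.pyRange 0 k 1)).getD i.toNat 0)
      = ops.foldl stepB (PySem.List.pyRange 0 k 1) := by
    apply List.ext_getElem
    · simp [hlenP, hRlen]
    · intro i h1 h2
      simp only [List.getElem_map]
      rw [PySem.List.getElem_pyRange_one]
      simp only [zero_add, Int.toNat_natCast]
      rw [List.getD_eq_getElem?_getD, List.getElem?_eq_getElem h2]
      rfl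
  have hsz : (PySem.List.pyRange 0 k 1).toArray.size
      = (ops.foldl stepB (PySem.List.pyRange 0 k 1)).length := by
    rw [hsz0, hRlen]
  have hcnt : List.foldl (fun (s : Array Bool × Int) i =>
        addSeenA s ((ops.foldl stepB (PySem.List.pyRange 0 k 1)).getD i.toNat 0))
        (Array.replicate (PySem.List.pyRange 0 k 1).toArray.size false, (0 : Int))
        (PySem.List.pyRange 0 k 1)
      = List.foldl addSeenB
        (Array.replicate (ops.foldl stepB (PySem.List.pyRange 0 k 1)).length false, (0 : Int))
        (ops.foldl stepB (PySem.List.pyRange 0 k 1)) := by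
    conv_rhs => rw [← hmap]
    rw [List.foldl_map, List.length_map, hlenP, hsz0]
    rfl
  rw [hcnt]
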